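-- pv_equiv track=rewrite | github.com/KDE/pology | misc/diff.py | _plinds_full
-- ===== SOURCE A (Python) =====
-- def _plinds_full (ninds, nplaces, baseind):
--
--     if nplaces < ninds:
--         return []
--     if ninds <= 0:
--         return [(None,) * nplaces]
--     else:
--         return (  [(baseind,) + x
--                    for x in _plinds_full(ninds - 1, nplaces - 1, baseind + 1)]
--                 + [(None,) + x
--                    for x in _plinds_full(ninds, nplaces - 1, baseind)])
-- ===== SOURCE B (Python) =====
-- def _plinds_full(ninds, nplaces, baseind):
--     if nplaces < ninds:
--         return []
--     if ninds <= 0: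
--         return [(None,) * nplaces]
--     # L[k] = all placements of the k largest indices into the slots processed so far
--     L = [[()]] + [[] for _ in range(ninds)]
--     for _ in range(nplaces):
--         L = [[(None,) + x for x in L[0]]] + \
--             [[(baseind + ninds - k,) + x for x in L[k - 1]] +
--              [(None,) + x for x in L[k]] for k in range(1, ninds + 1)]
--     return L[ninds]
-- ===== Notes on version B (the rewrite author's own statement) =====
-- stated objective: alternative
-- what changed: Replaces A's two-branch naive recursion with an iterative bottom-up DP table L[k] (placements of the k largest indices into the slots processed so far), filled over nplaces iterations and read off at L[ninds].
import Mathlib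
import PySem

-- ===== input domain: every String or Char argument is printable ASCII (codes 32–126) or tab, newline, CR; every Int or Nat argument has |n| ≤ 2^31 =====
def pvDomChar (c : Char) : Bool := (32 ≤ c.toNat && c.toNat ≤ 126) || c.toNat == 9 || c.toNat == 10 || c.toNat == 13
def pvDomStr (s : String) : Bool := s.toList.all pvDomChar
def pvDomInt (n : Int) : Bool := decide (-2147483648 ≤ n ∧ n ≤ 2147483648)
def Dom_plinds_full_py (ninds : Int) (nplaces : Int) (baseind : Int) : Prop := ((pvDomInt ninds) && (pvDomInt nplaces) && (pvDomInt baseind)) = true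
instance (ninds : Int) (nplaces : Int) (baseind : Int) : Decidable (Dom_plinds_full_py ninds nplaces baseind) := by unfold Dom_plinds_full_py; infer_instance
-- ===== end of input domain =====

-- B replaces A's two-way naive recursion by a bottom-up dynamic-programming table over the
-- number of placed indices (objective: alternative decomposition, same output, similar cost).

-- ===== PORT A =====
def plinds_full_py (ninds : Int) (nplaces : Int) (baseind : Int) : List (List (Option Int)) :=
  if nplaces < ninds then []
  else if ninds ≤ 0 then [List.replicate nplaces.toNat none]
  else
    (plinds_full_py (ninds - 1) (nplaces - 1) (baseind + 1)).map (fun x => some baseind :: x)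
      ++ (plinds_full_py ninds (nplaces - 1) baseind).map (fun x => none :: x)
termination_by nplaces.toNat
decreasing_by all_goals omega

-- ===== PORT B =====
-- one DP step: from the table over j slots to the table over j+1 slots (c = baseind + ninds)
def pvStep (c : Int) (n : Nat) (L : List (List (List (Option Int)))) : List (List (List (Option Int))) :=
  ((L.getD 0 []).map (fun x => none :: x)) ::
    (List.range' 1 n).map (fun k =>
      ((L.getD (k - 1) []).map (fun x => some (c - (k : Int)) :: x))
        ++ ((L.getD k []).map (fun x => none :: x)))

def plinds_full_py_alt (ninds : Int) (nplaces : Int) (baseind : Int) : List (List (Option Int)) :=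
  if nplaces < ninds then []
  else if ninds ≤ 0 then [List.replicate nplaces.toNat none]
  else
    let n := ninds.toNat
    let L0 : List (List (List (Option Int))) := [[]] :: List.replicate n []
    let L := (List.range nplaces.toNat).foldl (fun L _ => pvStep (baseind + ninds) n L) L0
    L.getD n []

-- ===== PRECONDITION & SPEC =====
-- Pre_ excludes the positive case with nplaces > 900: A's recursion depth grows with nplaces, so
-- CPython raises RecursionError for nplaces near and beyond its recursion limit (≈1000); the bound
-- is conservative, so a band of returning inputs just below the limit is excluded with it.
def Pre_plinds_full_py (ninds : Int) (nplaces : Int) (baseind : Int) : Prop :=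
  nplaces < ninds ∨ ninds ≤ 0 ∨ nplaces ≤ 900
instance (ninds : Int) (nplaces : Int) (baseind : Int) : Decidable (Pre_plinds_full_py ninds nplaces baseind) := by unfold Pre_plinds_full_py; infer_instance
def pvWitness_plinds_full_py : Int × Int × Int := (2, 4, 0)

def Spec_plinds_full_py (ninds : Int) (nplaces : Int) (baseind : Int) (out : List (List (Option Int))) : Prop := out = plinds_full_py_alt ninds nplaces baseind
instance (ninds : Int) (nplaces : Int) (baseind : Int) (out : List (List (Option Int))) : Decidable (Spec_plinds_full_py ninds nplaces baseind out) := by unfold Spec_plinds_full_py; infer_instance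

-- ===== CLAIM (what is proved, stated in full; the proofs are below) =====
def Claim_equal_plinds_full_py : Prop := ∀ (ninds : Int) (nplaces : Int) (baseind : Int), Dom_plinds_full_py ninds nplaces baseind → Pre_plinds_full_py ninds nplaces baseind → Spec_plinds_full_py ninds nplaces baseind (plinds_full_py ninds nplaces baseind)

-- ===== LEMMAS AND PROOFS =====

-- table invariant: after j steps, row k of the table is A's value for k indices in j slots
def pvInv (c : Int) (n : Nat) (j : Nat) (L : List (List (List (Option Int)))) : Prop :=
  ∀ k : Nat, k ≤ n → L.getD k [] = plinds_full_py (k : Int) (j : Int) (c - (k : Int))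

lemma plinds_zero (j c : Int) (hj : 0 ≤ j) : plinds_full_py 0 j c = [List.replicate j.toNat none] := by
  rw [plinds_full_py, if_neg (by omega), if_pos (by omega)]

lemma pvInv_init (c : Int) (n : Nat) : pvInv c n 0 ([[]] :: List.replicate n []) := by
  intro k hk
  cases k with
  | zero => simp [plinds_full_py]
  | succ m =>
      rw [plinds_full_py, if_pos (by push_cast; omega)]
      simp [List.getD, List.getElem?_replicate]
      split <;> rfl

lemma pvInv_step (c : Int) (n : Nat) (j : Nat) (L : List (List (List (Option Int))))
    (h : pvInv c n j L) : pvInv c n (j + 1) (pvStep c n L) := by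
  intro k hk
  cases k with
  | zero =>
      have h0 := h 0 (Nat.zero_le n)
      simp only [pvStep, List.getD_cons_zero, Int.natCast_zero, sub_zero] at h0 ⊢
      rw [h0, plinds_zero _ _ (by positivity), plinds_zero _ _ (by positivity)]
      have : ((j + 1 : Nat) : Int).toNat = (j : Int).toNat + 1 := by omega
      simp [List.replicate_succ]
  | succ m =>
      have hm : m < n := by omega
      have hget : (pvStep c n L).getD (m + 1) [] =
          ((L.getD m []).map (fun x => some (c - ((m : Int) + 1)) :: x))
            ++ ((L.getD (m + 1) []).map (fun x => none :: x)) := by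
        simp only [pvStep, List.getD, List.getElem?_cons_succ, List.getElem?_map]
        rw [List.getElem?_eq_getElem (by simpa using hm)]
        simp
        ring_nf
      rw [hget, h m (by omega), h (m + 1) hk]
      push_cast
      rw [show plinds_full_py ((m : Int) + 1) ((j : Int) + 1) (c - ((m : Int) + 1)) =
          if ((j : Int) + 1) < ((m : Int) + 1) then []
          else ((plinds_full_py (m : Int) (j : Int) (c - (m : Int))).map
                  (fun x => some (c - ((m : Int) + 1)) :: x))
            ++ ((plinds_full_py ((m : Int) + 1) (j : Int) (c - ((m : Int) + 1))).map
                  (fun x => none :: x)) from by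
        rw [plinds_full_py]
        split_ifs with h1 h2
        · rfl
        · omega
        · norm_num
          rw [show c - ((m : Int) + 1) + 1 = c - (m : Int) from by ring]]
      by_cases hj : (j : Int) + 1 < (m : Int) + 1
      · rw [if_pos hj]
        have e1 : plinds_full_py (m : Int) (j : Int) (c - (m : Int)) = [] := by
          rw [plinds_full_py, if_pos (by omega)]
        have e2 : plinds_full_py ((m : Int) + 1) (j : Int) (c - ((m : Int) + 1)) = [] := by
          rw [plinds_full_py, if_pos (by omega)]
        rw [e1, e2]; rfl
      · rw [if_neg hj]

lemma pvInv_fold (c : Int) (n : Nat) (jmax : Nat) :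
    pvInv c n jmax ((List.range jmax).foldl (fun L _ => pvStep c n L) ([[]] :: List.replicate n [])) := by
  induction jmax with
  | zero => exact pvInv_init c n
  | succ j ih =>
      rw [List.range_succ, List.foldl_append]
      exact pvInv_step c n j _ ih

-- ===== VERDICT (by name: the statement is the Claim_ definition above) =====
theorem plinds_full_py_spec : Claim_equal_plinds_full_py := by
  intro ninds nplaces baseind _ _
  unfold Spec_plinds_full_py plinds_full_py_alt
  split_ifs with h1 h2
  · rw [plinds_full_py, if_pos h1]
  · rw [plinds_full_py, if_neg h1, if_pos h2]
  · have := pvInv_fold (baseind + ninds) ninds.toNat nplaces.toNat ninds.toNat (le_refl _)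
    simp only []
    rw [this]
    congr 1 <;> omega
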